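-- pv_equiv track=rewrite | github.com/blaiszik/microstack | agent_example.py | parse_element_face
-- ===== SOURCE A (Python) =====
-- def parse_element_face(content: str) -> tuple[str, str]:
--     """Parse element and face from natural language input."""
--     known_elements = ['Cu', 'Pt', 'Au', 'Ag', 'Al', 'Ni', 'Pd', 'Fe', 'Ir', 'Rh', 'C', 'MoS2', 'WS2']
--     known_faces = ['100', '111', '110', 'graphene', '2d']
--
--     words = content.lower().split()
--     element = "Cu"  # Default
--     face = "100"    # Default
--
--     for w in words:
--         # Check for graphene special case
--         if w == 'graphene':
--             element = 'C'
--             face = 'graphene'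
--             break
--
--         # Check elements
--         w_cap = w.capitalize()
--         if w_cap in known_elements:
--             element = w_cap
--         elif w.upper() in ['MOS2', 'WS2']:
--             if w.lower() == 'mos2':
--                 element = 'MoS2'
--             if w.lower() == 'ws2':
--                 element = 'WS2'
--
--         # Check faces
--         if w in known_faces:
--             face = w
--
--     return element, face
-- ===== SOURCE B (Python) =====
-- def parse_element_face(content: str) -> tuple[str, str]:
--     """Parse element and face from natural language input."""
--     words = content.lower().split()
--     # graphene overrides everything (A's break sets both fields and stops)
--     if 'graphene' in words:
--         return ('C', 'graphene')
--
--     known_elements = {'Cu', 'Pt', 'Au', 'Ag', 'Al', 'Ni', 'Pd', 'Fe', 'Ir', 'Rh', 'C', 'MoS2', 'WS2'}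
--
--     def elem_of(w):
--         c = w.capitalize()
--         if c in known_elements:
--             return c
--         if w.upper() in ('MOS2', 'WS2'):
--             if w.lower() == 'mos2':
--                 return 'MoS2'
--             if w.lower() == 'ws2':
--                 return 'WS2'
--         return None
--
--     element = next((e for e in map(elem_of, reversed(words)) if e is not None), 'Cu')
--     face = next((w for w in reversed(words) if w in ('100', '111', '110', '2d')), '100')
--     return (element, face)
-- ===== Notes on version B (the rewrite author's own statement) =====
-- stated objective: simpler
-- what changed: A's single interleaved loop with mutable state and an early break is replaced by a graphene guard followed by two independent first-match lookups over the reversed word list (last-match-wins done declaratively).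
import Mathlib
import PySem

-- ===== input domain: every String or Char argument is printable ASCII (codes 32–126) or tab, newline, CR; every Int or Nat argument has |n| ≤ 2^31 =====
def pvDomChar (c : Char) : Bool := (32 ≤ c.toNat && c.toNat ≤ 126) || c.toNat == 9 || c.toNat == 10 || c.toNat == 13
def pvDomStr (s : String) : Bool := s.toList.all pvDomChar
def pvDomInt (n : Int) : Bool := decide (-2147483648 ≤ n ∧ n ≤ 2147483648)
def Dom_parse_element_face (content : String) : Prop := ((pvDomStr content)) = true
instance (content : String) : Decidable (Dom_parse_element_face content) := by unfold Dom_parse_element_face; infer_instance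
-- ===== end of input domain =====

-- B replaces A's single interleaved break-loop with a graphene guard plus two independent
-- last-match lookups (first match over the reversed word list); objective: simpler decomposition.

-- ===== PORT A =====
-- str.capitalize, ported by hand (no PySem primitive): first char upper-cased, rest
-- lower-cased — exact on the ASCII domain.
def pvCapitalize (s : String) : String :=
  match s.toList with
  | [] => ""
  | c :: cs => String.ofList (PySem.Chars.upperChar c :: cs.map PySem.Chars.lowerChar)

def pvKnownElements : List String :=
  ["Cu", "Pt", "Au", "Ag", "Al", "Ni", "Pd", "Fe", "Ir", "Rh", "C", "MoS2", "WS2"]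
def pvKnownFaces : List String := ["100", "111", "110", "graphene", "2d"]

-- A's for-loop with its break, as structural recursion over the words with state (element, face)
def pvLoopA : List String → String → String → String × String
  | [], element, face => (element, face)
  | w :: ws, element, face =>
    if w = "graphene" then ("C", "graphene")   -- break: loop ends here
    else
      let w_cap := pvCapitalize w
      let element' :=
        if pvKnownElements.contains w_cap then w_cap
        else if (["MOS2", "WS2"] : List String).contains (PySem.Str.upper w) then
          let e1 := if PySem.Str.lower w = "mos2" then "MoS2" else element
          if PySem.Str.lower w = "ws2" then "WS2" else e1
        else element
      let face' := if pvKnownFaces.contains w then w else face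
      pvLoopA ws element' face'

def parse_element_face (content : String) : String × String :=
  pvLoopA (PySem.Str.split₀ (PySem.Str.lower content)) "Cu" "100"

-- ===== PORT B =====
def pvKnownElementsB : List String :=
  ["Cu", "Pt", "Au", "Ag", "Al", "Ni", "Pd", "Fe", "Ir", "Rh", "C", "MoS2", "WS2"]

-- Source B's elem_of
def pvElemOf (w : String) : Option String :=
  let c := pvCapitalize w
  if pvKnownElementsB.contains c then some c
  else if (["MOS2", "WS2"] : List String).contains (PySem.Str.upper w) then
    if PySem.Str.lower w = "mos2" then some "MoS2"
    else if PySem.Str.lower w = "ws2" then some "WS2"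
    else none
  else none

def pvFaceB (w : String) : Bool := (["100", "111", "110", "2d"] : List String).contains w

def parse_element_face_alt (content : String) : String × String :=
  let words := PySem.Str.split₀ (PySem.Str.lower content)
  if words.contains "graphene" then ("C", "graphene")
  else
    ((words.reverse.findSome? pvElemOf).getD "Cu",
     (words.reverse.find? pvFaceB).getD "100")

-- ===== PRECONDITION & SPEC =====
def Spec_parse_element_face (content : String) (out : String × String) : Prop := out = parse_element_face_alt content
instance (content : String) (out : String × String) : Decidable (Spec_parse_element_face content out) := by unfold Spec_parse_element_face; infer_instance

-- ===== CLAIM (what is proved, stated in full; the proofs are below) =====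
def Claim_equal_parse_element_face : Prop := ∀ (content : String), Dom_parse_element_face content → Spec_parse_element_face content (parse_element_face content)

-- ===== LEMMAS AND PROOFS =====

theorem pvLoopA_graphene (ws : List String) (e f : String) (h : "graphene" ∈ ws) :
    pvLoopA ws e f = ("C", "graphene") := by
  induction ws generalizing e f with
  | nil => cases h
  | cons w ws ih =>
    by_cases hw : w = "graphene"
    · simp [pvLoopA, hw]
    · rcases List.mem_cons.mp h with h1 | h2
      · exact absurd h1.symm hw
      · simp only [pvLoopA, if_neg hw]
        exact ih _ _ h2

theorem getD_or (a b : Option String) (d : String) : (a.or b).getD d = a.getD (b.getD d) := by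
  cases a <;> simp

theorem pvLoopA_no_graphene (ws : List String) (e f : String) (h : "graphene" ∉ ws) :
    pvLoopA ws e f =
      ((ws.reverse.findSome? pvElemOf).getD e, (ws.reverse.find? pvFaceB).getD f) := by
  induction ws generalizing e f with
  | nil => simp [pvLoopA]
  | cons w ws ih =>
    have hw : w ≠ "graphene" := fun hc => h (hc ▸ List.mem_cons_self)
    have hws : "graphene" ∉ ws := fun hc => h (List.mem_cons_of_mem _ hc)
    simp only [pvLoopA, if_neg hw]
    rw [ih _ _ hws]
    have hrev : (w :: ws).reverse = ws.reverse ++ [w] := by simp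
    rw [hrev, List.findSome?_append, List.find?_append, getD_or, getD_or]
    congr 1
    · -- element component: A's step state equals (pvElemOf w).getD e
      simp only [List.findSome?, pvElemOf]
      rw [show pvKnownElementsB = pvKnownElements from rfl]
      split_ifs with h1 h2 h3 h4 <;> simp_all
    · -- face component: A's faces list minus the impossible "graphene" hit
      have : pvKnownFaces.contains w = pvFaceB w := by
        simp only [pvKnownFaces, pvFaceB, List.contains_eq_mem, List.mem_cons,
          List.not_mem_nil, decide_eq_decide]
        constructor
        · rintro (h | h | h | h | h | h) <;> simp_all
        · rintro (h | h | h | h | h) <;> simp_all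
      simp only [List.find?, this]
      cases hb : pvFaceB w <;> simp

-- ===== VERDICT (by name: the statement is the Claim_ definition above) =====
theorem parse_element_face_spec : Claim_equal_parse_element_face := by
  intro content _
  unfold Spec_parse_element_face parse_element_face parse_element_face_alt
  set words := PySem.Str.split₀ (PySem.Str.lower content) with hwords
  by_cases hg : words.contains "graphene"
  · rw [if_pos hg]
    exact pvLoopA_graphene _ _ _ (by simpa using hg)
  · rw [if_neg hg]
    exact pvLoopA_no_graphene _ _ _ (by simpa using hg)
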